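-- pv_equiv track=rewrite | github.com/ikn/gw2buildutil | gw2buildutil/parse/util.py | strip_empty_lines
-- ===== SOURCE A (Python) =====
-- def strip_empty_lines (lines, leading=True, trailing=True, inner=None):
--     in_leading = True
--     empty_count = 0
--
--     for line in lines:
--         if not line:
--             if not (leading and in_leading):
--                 empty_count += 1
--
--         else:
--             if inner == 'all' and not in_leading:
--                 pass
--             elif inner == 'collapse' and not in_leading:
--                 if empty_count > 0:
--                     yield ''
--             else: # inner is None or in_leading
--                 for i in range(empty_count):
--                     yield ''
--
--             empty_count = 0
--             in_leading = False
--             yield line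
--
--     if not trailing:
--         for i in range(empty_count):
--             yield ''
-- ===== SOURCE B (Python) =====
-- def _empty_run(lines):
--     run = []
--     for l in lines:
--         if l:
--             break
--         run.append(l)
--     return run
--
--
-- def _collapse(mid):
--     out = []
--     prev_empty = False
--     for l in mid:
--         if l:
--             out.append(l)
--             prev_empty = False
--         elif not prev_empty:
--             out.append('')
--             prev_empty = True
--     return out
--
--
-- def strip_empty_lines(lines, leading=True, trailing=True, inner=None):
--     lines = list(lines)
--     head = _empty_run(lines)
--     if len(head) == len(lines):
--         # stream is all empty: the single run is both leading and trailing
--         if not leading and not trailing: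
--             yield from lines
--         return
--     tail = _empty_run(reversed(lines))
--     mid = lines[len(head):len(lines) - len(tail)]
--     if not leading:
--         yield from head
--     if inner == 'all':
--         yield from (l for l in mid if l)
--     elif inner == 'collapse':
--         yield from _collapse(mid)
--     else:
--         yield from mid
--     if not trailing:
--         yield from tail
-- ===== Notes on version B (the rewrite author's own statement) =====
-- stated objective: alternative
-- what changed: Replaces A's one-pass counter/state-machine generator with a split-then-classify implementation: B slices the stream into leading empty run, body and trailing empty run, emits the leading/trailing runs verbatim iff kept, and transforms the body once per inner mode (identity / filter / run-collapse).
import Mathlib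
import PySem

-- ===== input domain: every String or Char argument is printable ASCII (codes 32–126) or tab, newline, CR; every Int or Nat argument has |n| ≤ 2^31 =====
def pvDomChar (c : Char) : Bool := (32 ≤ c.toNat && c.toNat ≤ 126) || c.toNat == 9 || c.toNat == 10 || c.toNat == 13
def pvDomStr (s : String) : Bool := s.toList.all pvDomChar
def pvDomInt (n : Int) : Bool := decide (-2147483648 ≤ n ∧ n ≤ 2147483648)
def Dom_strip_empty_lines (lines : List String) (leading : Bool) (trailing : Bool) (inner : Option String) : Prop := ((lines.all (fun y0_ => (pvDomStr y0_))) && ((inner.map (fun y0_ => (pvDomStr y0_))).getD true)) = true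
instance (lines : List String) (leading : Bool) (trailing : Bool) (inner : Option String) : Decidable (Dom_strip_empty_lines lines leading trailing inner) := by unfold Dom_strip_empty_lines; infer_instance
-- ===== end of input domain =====

-- B replaces A's counter/state-machine generator by a split-into-runs decomposition (leading run / body / trailing run), same cost; equivalence proved for all inputs.


-- ===== PORT A =====
-- one loop step of A's generator: state = (in_leading, empty_count, lines yielded so far)
def pvStepA (leading : Bool) (inner : Option String) (st : Bool × Nat × List String) (line : String) : Bool × Nat × List String :=
  let (inL, cnt, acc) := st
  if line = "" then
    if ¬ (leading = true ∧ inL = true) then (inL, cnt + 1, acc) else (inL, cnt, acc)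
  else
    let acc' :=
      if inner = some "all" ∧ inL = false then acc
      else if inner = some "collapse" ∧ inL = false then
        (if cnt > 0 then acc ++ [""] else acc)
      else
        acc ++ List.replicate cnt ""
    (false, 0, acc' ++ [line])

def strip_empty_lines (lines : List String) (leading : Bool) (trailing : Bool) (inner : Option String) : List String :=
  let st := lines.foldl (pvStepA leading inner) (true, 0, [])
  if trailing = false then st.2.2 ++ List.replicate st.2.1 "" else st.2.2

-- ===== PORT B =====
-- _empty_run: collect lines until the first non-empty one
def pvEmptyRun : List String → List String
  | [] => []
  | l :: ls => if l = "" then l :: pvEmptyRun ls else []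

-- _collapse: one pass with a prev_empty flag
def pvCollapseStep (st : List String × Bool) (l : String) : List String × Bool :=
  if l ≠ "" then (st.1 ++ [l], false)
  else if st.2 = false then (st.1 ++ [""], true)
  else st

def pvCollapse (mid : List String) : List String :=
  (mid.foldl pvCollapseStep ([], false)).1

def strip_empty_lines_alt (lines : List String) (leading : Bool) (trailing : Bool) (inner : Option String) : List String :=
  let head := pvEmptyRun lines
  if head.length = lines.length then
    if leading = false ∧ trailing = false then lines else []
  else
    let tail := pvEmptyRun lines.reverse
    let mid := PySem.List.slice lines (some (head.length : Int)) (some ((lines.length : Int) - (tail.length : Int)))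
    (if leading = false then head else []) ++
    (if inner = some "all" then mid.filter (fun l => l ≠ "")
     else if inner = some "collapse" then pvCollapse mid
     else mid) ++
    (if trailing = false then tail else [])

-- ===== PRECONDITION & SPEC =====
def Spec_strip_empty_lines (lines : List String) (leading : Bool) (trailing : Bool) (inner : Option String) (out : List String) : Prop := out = strip_empty_lines_alt lines leading trailing inner
instance (lines : List String) (leading : Bool) (trailing : Bool) (inner : Option String) (out : List String) : Decidable (Spec_strip_empty_lines lines leading trailing inner out) := by unfold Spec_strip_empty_lines; infer_instance

-- ===== CLAIM (what is proved, stated in full; the proofs are below) =====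
def Claim_equal_strip_empty_lines : Prop := ∀ (lines : List String) (leading : Bool) (trailing : Bool) (inner : Option String), Dom_strip_empty_lines lines leading trailing inner → Spec_strip_empty_lines lines leading trailing inner (strip_empty_lines lines leading trailing inner)

-- ===== LEMMAS AND PROOFS =====

-- the flush A performs at a non-leading non-empty line, per inner mode
def pvFlush (inner : Option String) (cnt : Nat) : List String :=
  if inner = some "all" then []
  else if inner = some "collapse" then (if cnt > 0 then [""] else [])
  else List.replicate cnt ""

-- A's yields after in_leading has become false, as a function of the pending count and the rest
def pvDelta (inner : Option String) : Nat → List String → List String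
  | _, [] => []
  | cnt, l :: M => if l = "" then pvDelta inner (cnt + 1) M
      else pvFlush inner cnt ++ l :: pvDelta inner 0 M

-- A's final pending count after in_leading has become false
def pvCntF : Nat → List String → Nat
  | cnt, [] => cnt
  | cnt, l :: M => if l = "" then pvCntF (cnt + 1) M else pvCntF 0 M

-- pvDelta with pending already emitted (used to line up _collapse's early emission)
def pvRho (inner : Option String) : List String → List String
  | [] => []
  | l :: M => if l = "" then pvRho inner M else l :: pvDelta inner 0 M

theorem pvEmptyRun_all_empty (lines : List String) : ∀ l ∈ pvEmptyRun lines, l = "" := by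
  induction lines with
  | nil => simp [pvEmptyRun]
  | cons a ls ih =>
    by_cases h : a = "" <;> simp [pvEmptyRun, h]
    exact ih

theorem pvEmptyRun_append_drop (lines : List String) :
    lines = pvEmptyRun lines ++ lines.drop (pvEmptyRun lines).length := by
  induction lines with
  | nil => simp [pvEmptyRun]
  | cons a ls ih =>
    by_cases h : a = "" <;> simp [pvEmptyRun, h]
    exact ih

theorem pvEmptyRun_drop_head (lines : List String) (x : String) (r : List String)
    (h : lines.drop (pvEmptyRun lines).length = x :: r) : x ≠ "" := by
  induction lines with
  | nil => simp at h
  | cons a ls ih =>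
    by_cases ha : a = "" <;> simp [pvEmptyRun, ha] at h
    · exact ih h
    · rcases h with ⟨h1, _⟩; rw [← h1]; exact ha

theorem pvEmptyRun_all_of_empty (lines : List String) (h : ∀ l ∈ lines, l = "") :
    pvEmptyRun lines = lines := by
  induction lines with
  | nil => rfl
  | cons a ls ih =>
    have ha : a = "" := h a (by simp)
    simp [pvEmptyRun, ha]
    exact ih (fun l hl => h l (by simp [hl]))

theorem replicate_length_of_all_empty (L : List String) (h : ∀ l ∈ L, l = "") :
    List.replicate L.length "" = L := by
  induction L with
  | nil => rfl
  | cons a ls ih =>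
    have := h a (by simp)
    simp [List.replicate, this]
    exact ih (fun l hl => h l (by simp [hl]))

-- A's fold over an all-empty segment while in_leading holds
theorem foldA_all_empty (leading : Bool) (inner : Option String) (L : List String)
    (h : ∀ l ∈ L, l = "") (cnt : Nat) (acc : List String) :
    L.foldl (pvStepA leading inner) (true, cnt, acc)
      = (true, cnt + (if leading = true then 0 else L.length), acc) := by
  induction L generalizing cnt with
  | nil => simp
  | cons a ls ih =>
    have ha : a = "" := h a (by simp)
    have hrest : ∀ l ∈ ls, l = "" := fun l hl => h l (by simp [hl])
    cases leading with
    | true => simp [pvStepA, ha, ih hrest]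
    | false =>
      simp [pvStepA, ha, ih hrest]
      omega

-- A's fold once in_leading is false
theorem foldA_body (leading : Bool) (inner : Option String) (M : List String) :
    ∀ (cnt : Nat) (acc : List String),
    M.foldl (pvStepA leading inner) (false, cnt, acc)
      = (false, pvCntF cnt M, acc ++ pvDelta inner cnt M) := by
  induction M with
  | nil => simp [pvCntF, pvDelta]
  | cons l M ih =>
    intro cnt acc
    by_cases hl : l = ""
    · rw [List.foldl_cons, show pvStepA leading inner (false, cnt, acc) l = (false, cnt + 1, acc) by
        simp [pvStepA, hl], ih (cnt + 1) acc]
      simp [pvCntF, pvDelta, hl]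
    · have hstep : pvStepA leading inner (false, cnt, acc) l
          = (false, 0, (acc ++ pvFlush inner cnt) ++ [l]) := by
        cases hin : inner with
        | none => simp [pvStepA, hl, pvFlush]
        | some s =>
          by_cases hall : s = "all"
          · simp [pvStepA, hl, hall, pvFlush]
          · by_cases hcol : s = "collapse"
            · by_cases hc : cnt > 0 <;> simp [pvStepA, hl, hcol, pvFlush, hc]
            · simp [pvStepA, hl, hcol, hall, pvFlush]
      rw [List.foldl_cons, hstep, ih 0 ((acc ++ pvFlush inner cnt) ++ [l])]
      simp [pvCntF, pvDelta, hl]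

theorem pvCntF_all_empty (L : List String) (h : ∀ l ∈ L, l = "") (cnt : Nat) :
    pvCntF cnt L = cnt + L.length := by
  induction L generalizing cnt with
  | nil => simp [pvCntF]
  | cons a ls ih =>
    have ha : a = "" := h a (by simp)
    simp [pvCntF, ha, ih (fun l hl => h l (by simp [hl]))]
    omega

theorem pvCntF_append (cnt : Nat) (P L : List String) :
    pvCntF cnt (P ++ L) = pvCntF (pvCntF cnt P) L := by
  induction P generalizing cnt with
  | nil => simp [pvCntF]
  | cons a P ih => by_cases ha : a = "" <;> simp [pvCntF, ha, ih]

theorem pvCntF_ends_nonempty (P : List String) :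
    P.getLast? ≠ some "" → ∀ cnt, pvCntF cnt P = (if P.isEmpty then cnt else 0) := by
  induction P with
  | nil => intro _ cnt; simp [pvCntF]
  | cons a P ih =>
    intro h cnt
    by_cases ha : a = ""
    · have hPne : P ≠ [] := by
        intro hP; subst hP; simp [ha] at h
      have h' : P.getLast? ≠ some "" := by
        cases P with
        | nil => exact absurd rfl hPne
        | cons b Q => simpa [List.getLast?_cons_cons] using h
      rw [pvCntF, if_pos ha, ih h' (cnt + 1)]
      simp [hPne]
    · rw [pvCntF, if_neg ha]
      cases P with
      | nil => simp [pvCntF]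
      | cons b Q =>
        have h' : (b :: Q).getLast? ≠ some "" := by
          simpa [List.getLast?_cons_cons] using h
        rw [ih h' 0]
        simp

theorem pvDelta_all_empty (inner : Option String) (L : List String) (h : ∀ l ∈ L, l = "") :
    ∀ cnt, pvDelta inner cnt L = [] := by
  induction L with
  | nil => intro cnt; simp [pvDelta]
  | cons a ls ih =>
    intro cnt
    have ha : a = "" := h a (by simp)
    simp [pvDelta, ha, ih (fun l hl => h l (by simp [hl]))]

theorem pvDelta_append_empty (inner : Option String) (P L : List String)
    (h : ∀ l ∈ L, l = "") : ∀ cnt, pvDelta inner cnt (P ++ L) = pvDelta inner cnt P := by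
  induction P with
  | nil => intro cnt; simp [pvDelta, pvDelta_all_empty inner L h]
  | cons a P ih =>
    intro cnt
    by_cases ha : a = "" <;> simp [pvDelta, ha, ih]

-- inner = None (or any unrecognised value): the body is reproduced verbatim
theorem pvDelta_default (inner : Option String) (hin : inner ≠ some "all")
    (hin2 : inner ≠ some "collapse") (M : List String) :
    ∀ cnt, (M.getLast? ≠ some "") → (M = [] → cnt = 0) →
      pvDelta inner cnt M = List.replicate cnt "" ++ M := by
  induction M with
  | nil => intro cnt _ h0; simp [pvDelta, h0 rfl]
  | cons a M ih =>
    intro cnt hlast _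
    have hM : M.getLast? ≠ some "" ∨ M = [] := by
      cases M with
      | nil => exact Or.inr rfl
      | cons b Q => exact Or.inl (by simpa [List.getLast?_cons_cons] using hlast)
    by_cases ha : a = ""
    · have hMne : M ≠ [] := by
        intro h; subst h; simp [ha] at hlast
      have hlast' : M.getLast? ≠ some "" := hM.resolve_right hMne
      rw [pvDelta, if_pos ha, ih (cnt + 1) hlast' (fun h => absurd h hMne)]
      simp [ha, List.replicate_succ' (n := cnt)]
    · have : pvFlush inner cnt = List.replicate cnt "" := by
        simp [pvFlush, hin, hin2]
      rcases hM with hlast' | hnil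
      · rw [pvDelta, if_neg ha, ih 0 hlast' (fun _ => rfl)]
        simp [this]
      · subst hnil; simp [pvDelta, ha, this]

-- inner = 'all': the body is filtered
theorem pvDelta_all (M : List String) :
    ∀ cnt, pvDelta (some "all") cnt M = M.filter (fun l => l ≠ "") := by
  induction M with
  | nil => intro cnt; simp [pvDelta]
  | cons a M ih =>
    intro cnt
    by_cases ha : a = "" <;> simp [pvDelta, ha, pvFlush, List.filter, ih]

-- inner = 'collapse': pending run already emitted ⇒ pvRho
theorem pvDelta_collapse_pos (M : List String) :
    ∀ cnt, 0 < cnt → M.getLast? ≠ some "" → M ≠ [] →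
      pvDelta (some "collapse") cnt M = "" :: pvRho (some "collapse") M := by
  induction M with
  | nil => intro _ _ _ h; exact absurd rfl h
  | cons a M ih =>
    intro cnt hc hlast _
    by_cases ha : a = ""
    · have hMne : M ≠ [] := by intro h; subst h; simp [ha] at hlast
      have hlast' : M.getLast? ≠ some "" := by
        cases M with
        | nil => exact absurd rfl hMne
        | cons b Q => simpa [List.getLast?_cons_cons] using hlast
      rw [pvDelta, if_pos ha, ih (cnt + 1) (by omega) hlast' hMne]
      simp [pvRho, ha]
    · simp [pvDelta, pvRho, ha, pvFlush, hc]

theorem pvCollapse_fold (M : List String) :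
    M.getLast? ≠ some "" →
    (∀ acc, (M.foldl pvCollapseStep (acc, false)).1 = acc ++ pvDelta (some "collapse") 0 M) ∧
    (∀ acc, (M.foldl pvCollapseStep (acc, true)).1 = acc ++ pvRho (some "collapse") M) := by
  induction M with
  | nil => intro _; constructor <;> intro acc <;> simp [pvDelta, pvRho]
  | cons a M ih =>
    intro hlast
    have hM : M.getLast? ≠ some "" ∨ M = [] := by
      cases M with
      | nil => exact Or.inr rfl
      | cons b Q => exact Or.inl (by simpa [List.getLast?_cons_cons] using hlast)
    by_cases ha : a = ""
    · have hMne : M ≠ [] := by intro h; subst h; simp [ha] at hlast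
      have hlast' : M.getLast? ≠ some "" := hM.resolve_right hMne
      obtain ⟨ihf, iht⟩ := ih hlast'
      constructor <;> intro acc
      · rw [List.foldl_cons]
        have : pvCollapseStep (acc, false) a = (acc ++ [""], true) := by
          simp [pvCollapseStep, ha]
        rw [this, iht]
        rw [show pvDelta (some "collapse") 0 (a :: M) = pvDelta (some "collapse") 1 M by
          simp [pvDelta, ha]]
        rw [pvDelta_collapse_pos M 1 (by omega) hlast' hMne]
        simp
      · rw [List.foldl_cons]
        have : pvCollapseStep (acc, true) a = (acc, true) := by
          simp [pvCollapseStep, ha]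
        rw [this, iht]
        simp [pvRho, ha]
    · constructor <;> intro acc <;> rw [List.foldl_cons]
      · have hstep : pvCollapseStep (acc, false) a = (acc ++ [a], false) := by
          simp [pvCollapseStep, ha]
        rw [hstep]
        rcases hM with hlast' | hnil
        · rw [(ih hlast').1, ]
          simp [pvDelta, ha, pvFlush]
        · subst hnil; simp [pvDelta, ha, pvFlush]
      · have hstep : pvCollapseStep (acc, true) a = (acc ++ [a], false) := by
          simp [pvCollapseStep, ha]
        rw [hstep]
        rcases hM with hlast' | hnil
        · rw [(ih hlast').1]
          simp [pvRho, ha]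
        · subst hnil; simp [pvRho, ha, pvDelta]

theorem pvEmptyRun_append_nonempty (P Q : List String) (x : String) (hx : x ≠ "") :
    pvEmptyRun (P ++ x :: Q) = pvEmptyRun P := by
  induction P with
  | nil => simp [pvEmptyRun, hx]
  | cons a P ih => by_cases ha : a = "" <;> simp [pvEmptyRun, ha, ih]

theorem reverse_of_all_empty (L : List String) (h : ∀ l ∈ L, l = "") :
    L.reverse = L := by
  conv_lhs => rw [← replicate_length_of_all_empty L h]
  rw [List.reverse_replicate, replicate_length_of_all_empty L h]

-- ===== VERDICT (by name: the statement is the Claim_ definition above) =====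
theorem strip_empty_lines_spec : Claim_equal_strip_empty_lines := by
  intro lines leading trailing inner _
  unfold Spec_strip_empty_lines strip_empty_lines strip_empty_lines_alt
  have hE1 : ∀ l ∈ pvEmptyRun lines, l = "" := pvEmptyRun_all_empty lines
  have hsplit := pvEmptyRun_append_drop lines
  cases hr : lines.drop (pvEmptyRun lines).length with
  | nil =>
    -- all lines are empty
    have hall : ∀ l ∈ lines, l = "" := by
      intro l hl
      rw [hsplit, hr] at hl
      exact hE1 l (by simpa using hl)
    have hhead : pvEmptyRun lines = lines := pvEmptyRun_all_of_empty lines hall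
    rw [foldA_all_empty leading inner lines hall 0 []]
    rw [hhead]
    rw [if_pos rfl]
    cases leading with
    | true =>
      cases trailing <;> simp
    | false =>
      cases trailing with
      | false => simpa using replicate_length_of_all_empty lines hall
      | true => simp
  | cons x M =>
    have hx : x ≠ "" := pvEmptyRun_drop_head lines x M hr
    rw [hr] at hsplit
    -- names for the pieces
    set E1 := pvEmptyRun lines with hE1def
    -- trailing empty run of M
    have hT : ∀ l ∈ pvEmptyRun M.reverse, l = "" := pvEmptyRun_all_empty M.reverse
    have hTsplit := pvEmptyRun_append_drop M.reverse
    set T := pvEmptyRun M.reverse with hTdef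
    set R := M.reverse.drop T.length with hRdef
    have hTrev : T.reverse = T := reverse_of_all_empty T hT
    have hM : M = R.reverse ++ T := by
      have : M.reverse = T ++ R := hTsplit
      calc M = M.reverse.reverse := by simp
        _ = (T ++ R).reverse := by rw [← this]
        _ = R.reverse ++ T.reverse := by simp
        _ = R.reverse ++ T := by rw [hTrev]
    set M0 := R.reverse with hM0def
    have hM0last : M0.getLast? ≠ some "" := by
      cases hR : R with
      | nil => simp [hM0def, hR]
      | cons y r' =>
        have hy : y ≠ "" := pvEmptyRun_drop_head M.reverse y r' (by rw [← hRdef, hR])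
        rw [hM0def, hR, List.getLast?_reverse]
        simpa using hy
    -- the tail run B computes is T
    have htail : pvEmptyRun lines.reverse = T := by
      rw [hsplit]
      have : (E1 ++ x :: M).reverse = M.reverse ++ x :: E1.reverse := by simp
      rw [this, pvEmptyRun_append_nonempty _ _ x hx]
    -- A's fold, decomposed
    conv_lhs => rw [hsplit]
    rw [List.foldl_append, foldA_all_empty leading inner E1 hE1 0 []]
    rw [List.foldl_cons]
    have hstep : pvStepA leading inner (true, 0 + (if leading = true then 0 else E1.length), []) x
        = (false, 0, List.replicate (if leading = true then 0 else E1.length) "" ++ [x]) := by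
      cases leading <;> simp [pvStepA, hx]
    rw [hstep, foldA_body]
    -- A's pending count and delta over M = M0 ++ T
    have hcnt : pvCntF 0 M = T.length := by
      rw [hM, pvCntF_append, pvCntF_ends_nonempty M0 hM0last 0]
      have := pvCntF_all_empty T hT
      cases hM0e : M0.isEmpty <;> simp [hM0e] at * <;>
        simp [pvCntF_all_empty T hT]
    have hdelta : pvDelta inner 0 M = pvDelta inner 0 M0 := by
      rw [hM]; exact pvDelta_append_empty inner M0 T hT 0
    -- B's branch condition: not all empty
    have hlen : ¬ E1.length = lines.length := by
      rw [hsplit]; simp only [List.length_append, List.length_cons]; omega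
    -- B's mid slice is x :: M0
    have hTle : T.length ≤ M.length := by
      rw [hM]; simp
    have hmid : PySem.List.slice lines (some (E1.length : Int))
        (some ((lines.length : Int) - (T.length : Int))) = x :: M0 := by
      have hcast : ((lines.length : Int) - (T.length : Int))
          = ((lines.length - T.length : Nat) : Int) := by
        have h4 : T.length ≤ M.length := by rw [hM]; simp
        have h5 : M.length ≤ lines.length := by
          rw [hsplit]; simp only [List.length_append, List.length_cons]; omega
        omega
      rw [hcast, PySem.List.slice_natCast]
      conv_lhs => rw [hsplit, hM]
      have h1 : (E1 ++ x :: (M0 ++ T)).drop E1.length = x :: (M0 ++ T) := by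
        simp
      rw [h1]
      have h2 : (E1 ++ x :: (M0 ++ T)).length - T.length - E1.length = M0.length + 1 := by
        simp; omega
      rw [h2]
      have h3 : (M0 ++ T).take M0.length = M0 := List.take_left ..
      simp [List.take_succ_cons, h3]
    -- now pure bookkeeping over leading/trailing/inner branches
    have hrepT : List.replicate T.length "" = T := replicate_length_of_all_empty T hT
    have hrepE1 : List.replicate E1.length "" = E1 := replicate_length_of_all_empty E1 hE1
    have hbody : (if inner = some "all" then (x :: M0).filter (fun l => decide (l ≠ ""))
        else if inner = some "collapse" then pvCollapse (x :: M0)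
        else x :: M0) = x :: pvDelta inner 0 M0 := by
      cases hin : inner with
      | none =>
        rw [if_neg (by simp), if_neg (by simp)]
        rw [pvDelta_default none (by simp) (by simp) M0 0 hM0last (fun _ => rfl)]
        simp
      | some s =>
        by_cases hall : s = "all"
        · subst hall
          rw [if_pos rfl]
          rw [pvDelta_all M0 0]
          simp [List.filter, hx]
        · by_cases hcol : s = "collapse"
          · subst hcol
            rw [if_neg (by simp [hall]), if_pos rfl]
            unfold pvCollapse
            rw [List.foldl_cons]
            have : pvCollapseStep ([], false) x = ([x], false) := by
              simp [pvCollapseStep, hx]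
            rw [this, (pvCollapse_fold M0 hM0last).1 [x]]
            simp
          · rw [if_neg (by simp [hall]), if_neg (by simp [hcol])]
            rw [pvDelta_default (some s) (by simp [hall]) (by simp [hcol]) M0 0 hM0last
              (fun _ => rfl)]
            simp
    simp only [hcnt, hdelta, htail, hmid, hbody]
    rw [if_neg hlen]
    cases leading <;> cases trailing <;> simp [hrepT, hrepE1]
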